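-- pv_equiv track=rewrite | github.com/aniruddhamurali/Project-Euler | Python/Problem63.py | digit_power
-- ===== SOURCE A (Python) =====
-- def digit_power(n):
--     answer = 0
--     for count in range(1, n):
--         stringNum = str(count)
--         lengthNum = len(stringNum)
--         for i in range(1,10):
--             if i**lengthNum == count:
--                 answer = answer + 1
--     return answer
-- ===== SOURCE B (Python) =====
-- def digit_power(n):
--     # i**p has p digits only when i**p >= 10**(p-1), which fails for every
--     # i <= 9 once p >= 22 (9**p < 10**(p-1) there), so checking p in 1..21
--     # covers all d-digit d-th powers regardless of n.
--     answer = 0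
--     for i in range(1, 10):
--         for p in range(1, 22):
--             x = i ** p
--             if len(str(x)) == p and x < n:
--                 answer += 1
--     return answer
-- ===== Notes on version B (the rewrite author's own statement) =====
-- stated objective: faster
-- what changed: Instead of scanning every integer below n and testing whether it is a d-th power of some base 1..9 (O(n) loop iterations), B enumerates the fixed 9x21 grid of base/exponent pairs (i in 1..9, p in 1..21 -- the only exponents for which i**p can have exactly p digits) and counts those with len(str(i**p)) == p and i**p < n, independent of n.
import Mathlib
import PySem

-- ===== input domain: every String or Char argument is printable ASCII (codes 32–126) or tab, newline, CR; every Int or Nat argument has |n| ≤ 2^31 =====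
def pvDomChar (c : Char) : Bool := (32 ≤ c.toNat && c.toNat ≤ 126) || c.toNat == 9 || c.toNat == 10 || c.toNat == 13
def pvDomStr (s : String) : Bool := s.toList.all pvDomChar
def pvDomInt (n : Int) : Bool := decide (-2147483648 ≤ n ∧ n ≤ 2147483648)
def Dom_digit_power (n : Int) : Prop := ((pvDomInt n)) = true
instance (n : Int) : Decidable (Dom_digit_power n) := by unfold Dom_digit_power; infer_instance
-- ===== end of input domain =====

-- B replaces A's O(n) scan of every integer below n by a scan of the fixed 9×21 grid of base/exponent
-- pairs (i in 1..9, p in 1..21), counting those with len(str(i**p)) == p and i**p < n (faster).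

-- ===== PORT A =====
def digit_power (n : Int) : Int :=
  (PySem.List.pyRange 1 n 1).foldl (fun answer count =>
    let stringNum := PySem.Int.toStr count
    let lengthNum := PySem.Str.len stringNum
    -- `i ** lengthNum`: lengthNum = len(str(count)) ≥ 0 always, so `.toNat` is exact here
    (PySem.List.pyRange 1 10 1).foldl (fun answer i =>
      if i ^ lengthNum.toNat == count then answer + 1 else answer) answer) 0

-- ===== PORT B =====
def digit_power_alt (n : Int) : Int :=
  (PySem.List.pyRange 1 10 1).foldl (fun answer i =>
    (PySem.List.pyRange 1 22 1).foldl (fun answer p =>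
      -- `i ** p`: p ranges over 1..21, so `.toNat` is exact here
      let x := i ^ p.toNat
      if PySem.Str.len (PySem.Int.toStr x) == p && decide (x < n) then answer + 1 else answer)
      answer) 0

-- ===== PRECONDITION & SPEC =====
def Spec_digit_power (n : Int) (out : Int) : Prop := out = digit_power_alt n
instance (n : Int) (out : Int) : Decidable (Spec_digit_power n out) := by unfold Spec_digit_power; infer_instance

-- ===== CLAIM (what is proved, stated in full; the proofs are below) =====
def Claim_equal_digit_power : Prop := ∀ (n : Int), Dom_digit_power n → Spec_digit_power n (digit_power n)

-- ===== LEMMAS AND PROOFS =====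

-- All d-digit d-th powers of bases 1..9 (grouped by base, ascending exponent).
def pvL : List Int :=
  [1, 2, 3, 4, 16, 5, 25, 125, 6, 36, 216, 1296,
   7, 49, 343, 2401, 16807, 117649,
   8, 64, 512, 4096, 32768, 262144, 2097152, 16777216, 134217728, 1073741824,
   9, 81, 729, 6561, 59049, 531441, 4782969, 43046721, 387420489, 3486784401,
   31381059609, 282429536481, 2541865828329, 22876792454961, 205891132094649,
   1853020188851841, 16677181699666569, 150094635296999121, 1350851717672992089,
   12157665459056928801, 109418989131512359209]

lemma pv_ge_one : ∀ e ∈ pvL, (1:Int) ≤ e := by decide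

-- counting members of one nodup list inside another is symmetric
lemma pv_swap (xs L : List Int) (hx : xs.Nodup) (hL : L.Nodup) :
    xs.countP (fun a => decide (a ∈ L)) = L.countP (fun a => decide (a ∈ xs)) := by
  rw [List.countP_eq_length_filter, List.countP_eq_length_filter]
  rw [← List.toFinset_card_of_nodup (List.Nodup.filter _ hx),
      ← List.toFinset_card_of_nodup (List.Nodup.filter _ hL)]
  congr 1
  rw [List.toFinset_filter, List.toFinset_filter]
  ext x
  simp [List.mem_toFinset]
  tauto

-- A's inner loop count: c equals i^(digit-length of c) for exactly one i in 1..9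
-- iff c is one of the 49 digit-power values, else for none.
lemma pv_count9 (c : Int) (h1 : 1 ≤ c) (h2 : c < 2147483648) :
    List.countP (fun i => i ^ (PySem.Str.len (PySem.Int.toStr c)).toNat == c)
        [1,2,3,4,5,6,7,8,9]
      = if c ∈ pvL then 1 else 0 := by
  by_cases hc : c ∈ pvL
  · fin_cases hc <;> decide
  · rw [if_neg hc, List.countP_eq_zero]
    obtain ⟨k, hk⟩ : ∃ k, (PySem.Str.len (PySem.Int.toStr c)).toNat = k := ⟨_, rfl⟩
    rw [hk]
    intro i hi heq
    rw [beq_iff_eq] at heq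
    fin_cases hi
    · -- i = 1
      rw [one_pow] at heq
      exact hc (heq ▸ (by decide : (1:Int) ∈ pvL))
    all_goals {
      have hbk : k ≤ 31 := by
        by_contra hk31
        have h2k : (2:Int)^32 ≤ 2^k := pow_le_pow_right₀ (by norm_num) (by omega)
        have hcc : (2:Int)^32 ≤ c :=
          le_trans h2k (le_trans (pow_le_pow_left₀ (by norm_num) (by norm_num) k) heq.le)
        norm_num at hcc
        omega
      interval_cases k <;> (subst heq; revert hk hc; decide)
    }

-- A counts exactly the members of pvL below n
lemma pv_A_eq (n : Int) (hn : n ≤ 2147483648) :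
    digit_power n = (List.countP (fun e => decide (e < n)) pvL : Nat) := by
  unfold digit_power
  rw [show (PySem.List.pyRange 1 10 1) = [1,2,3,4,5,6,7,8,9] from by decide]
  simp only [PySem.List.foldl_if_add_one]
  rw [PySem.List.foldl_add]
  have hmap : List.map (fun c => ((List.countP
        (fun i => i ^ (PySem.Str.len (PySem.Int.toStr c)).toNat == c)
        [1,2,3,4,5,6,7,8,9] : Nat) : Int)) (PySem.List.pyRange 1 n 1)
      = List.map (fun c => if decide (c ∈ pvL) then (1:Int) else 0)
        (PySem.List.pyRange 1 n 1) := by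
    apply List.map_congr_left
    intro c hcmem
    obtain ⟨hc1, hc2⟩ := PySem.List.mem_pyRange_one.mp hcmem
    rw [pv_count9 c hc1 (by omega)]
    split_ifs <;> simp_all
  rw [hmap, PySem.List.sum_map_ite_one_zero]
  rw [pv_swap _ _ (PySem.List.nodup_pyRange_one 1 n) (by decide)]
  have hco : List.countP (fun a => decide (a ∈ PySem.List.pyRange 1 n 1)) pvL
      = List.countP (fun e => decide (e < n)) pvL := by
    apply List.countP_congr
    intro e he
    have h1e := pv_ge_one e he
    simp [PySem.List.mem_pyRange_one, h1e]
  rw [hco]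
  simp

-- B's inner loop over exponents, for one base i, counts the members of i's chain below n
lemma pv_B_gen (i : Int) (exps chain : List Int)
    (hfilter : List.filter
        (fun p => PySem.Str.len (PySem.Int.toStr (i ^ p.toNat)) == p)
        [1,2,3,4,5,6,7,8,9,10,11,12,13,14,15,16,17,18,19,20,21] = exps)
    (hmap : List.map (fun p => i ^ p.toNat) exps = chain) (n : Int) :
    List.countP
        (fun p => PySem.Str.len (PySem.Int.toStr (i ^ p.toNat)) == p && decide (i ^ p.toNat < n))
        [1,2,3,4,5,6,7,8,9,10,11,12,13,14,15,16,17,18,19,20,21]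
      = List.countP (fun e => decide (e < n)) chain := by
  rw [← hmap, List.countP_map, ← hfilter, List.countP_filter]
  apply List.countP_congr
  intro p _
  simp [Function.comp, Bool.and_comm]

lemma pv_B_eq (n : Int) :
    digit_power_alt n = (List.countP (fun e => decide (e < n)) pvL : Nat) := by
  unfold digit_power_alt
  rw [show (PySem.List.pyRange 1 10 1) = [1,2,3,4,5,6,7,8,9] from by decide,
      show (PySem.List.pyRange 1 22 1)
        = [1,2,3,4,5,6,7,8,9,10,11,12,13,14,15,16,17,18,19,20,21] from by decide]
  simp only [PySem.List.foldl_if_add_one]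
  rw [PySem.List.foldl_add]
  simp only [List.map_cons, List.map_nil, List.sum_cons, List.sum_nil]
  rw [pv_B_gen 1 [1] [1] (by decide) (by decide) n,
      pv_B_gen 2 [1] [2] (by decide) (by decide) n,
      pv_B_gen 3 [1] [3] (by decide) (by decide) n,
      pv_B_gen 4 [1,2] [4,16] (by decide) (by decide) n,
      pv_B_gen 5 [1,2,3] [5,25,125] (by decide) (by decide) n,
      pv_B_gen 6 [1,2,3,4] [6,36,216,1296] (by decide) (by decide) n,
      pv_B_gen 7 [1,2,3,4,5,6] [7,49,343,2401,16807,117649] (by decide) (by decide) n,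
      pv_B_gen 8 [1,2,3,4,5,6,7,8,9,10]
        [8,64,512,4096,32768,262144,2097152,16777216,134217728,1073741824]
        (by decide) (by decide) n,
      pv_B_gen 9 [1,2,3,4,5,6,7,8,9,10,11,12,13,14,15,16,17,18,19,20,21]
        [9,81,729,6561,59049,531441,4782969,43046721,387420489,3486784401,
         31381059609,282429536481,2541865828329,22876792454961,205891132094649,
         1853020188851841,16677181699666569,150094635296999121,1350851717672992089,
         12157665459056928801,109418989131512359209] (by decide) (by decide) n]
  rw [show pvL = [(1:Int)] ++ [2] ++ [3] ++ [4,16] ++ [5,25,125] ++ [6,36,216,1296]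
        ++ [7,49,343,2401,16807,117649]
        ++ [8,64,512,4096,32768,262144,2097152,16777216,134217728,1073741824]
        ++ [9,81,729,6561,59049,531441,4782969,43046721,387420489,3486784401,
            31381059609,282429536481,2541865828329,22876792454961,205891132094649,
            1853020188851841,16677181699666569,150094635296999121,1350851717672992089,
            12157665459056928801,109418989131512359209] from by decide]
  simp only [List.countP_append]
  push_cast
  ring

-- ===== VERDICT (by name: the statement is the Claim_ definition above) =====
theorem digit_power_spec : Claim_equal_digit_power := by
  unfold Claim_equal_digit_power
  intro n hdom
  unfold Dom_digit_power pvDomInt at hdom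
  rw [decide_eq_true_iff] at hdom
  unfold Spec_digit_power
  rw [pv_A_eq n hdom.2, pv_B_eq n]
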